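-- pv_equiv track=rewrite | github.com/glelis/muff | muff_capture/muff_camview.py | show_chars
-- ===== SOURCE A (Python) =====
-- def show_chars(s, blanks):
--   """Given a string {s}, returns a copy
--   with each non-printing char replaced by '[chr({NNN})]',
--   where {NNN} is the character's decimal {ord}.  Also replaces
--   quotes, brackets, parentheses. If {blanks} is true,
--   replaces blanks too."""
--
--   n = len(s)
--   res = ""
--   bad = "\'\"[]()" # Printable characters that should be converted too.
--   for i in range(n):
--     c = s[i]
--     if (c == ' ' and blanks) or (c < ' ') or (c > '~') or (bad.find(c) >= 0):
--       # Show chr code: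
--       res = res + ("[chr(%03d)]" % ord(c))
--     else:
--       res = res + c
--   return res
-- ===== SOURCE B (Python) =====
-- # Table-driven rewrite: one str.translate pass with a precomputed table
-- # (dict with __missing__ deciding printability), then a single replace for
-- # blanks -- instead of A's index loop with a per-char condition chain.
--
-- def _esc(code):
--     return "[chr(%03d)]" % code
--
-- class _Table(dict):
--     def __missing__(self, code):
--         return chr(code) if 32 <= code <= 126 else _esc(code)
--
-- _TABLE = _Table({ord(c): _esc(ord(c)) for c in "'\"[]()"})
--
-- def show_chars(s, blanks):
--     t = s.translate(_TABLE)
--     return t.replace(' ', _esc(32)) if blanks else t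
-- ===== Notes on version B (the rewrite author's own statement) =====
-- stated objective: faster
-- what changed: Replaces the explicit index loop with repeated string concatenation by a single str.translate pass over a precomputed escape table (a dict whose __missing__ decides printability), followed by one str.replace for the blanks case.
import Mathlib
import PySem

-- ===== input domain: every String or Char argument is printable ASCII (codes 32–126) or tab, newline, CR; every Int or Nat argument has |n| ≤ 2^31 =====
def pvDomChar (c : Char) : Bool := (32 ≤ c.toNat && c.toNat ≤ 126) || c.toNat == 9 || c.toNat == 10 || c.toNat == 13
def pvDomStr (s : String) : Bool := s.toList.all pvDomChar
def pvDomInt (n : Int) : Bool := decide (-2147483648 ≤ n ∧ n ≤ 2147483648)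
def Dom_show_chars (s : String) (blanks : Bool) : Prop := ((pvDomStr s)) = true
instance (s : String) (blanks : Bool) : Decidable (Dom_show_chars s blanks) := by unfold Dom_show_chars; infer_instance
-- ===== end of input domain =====

-- B replaces A's index loop (repeated concatenation, per-char condition chain) by one
-- translate pass over a precomputed escape table plus one replace for blanks; return
-- values agree on the whole domain.

-- '"[chr(%03d)]" % code' (both Pythons format this way)
def pvFmt (code : Nat) : List Char :=
  let ds := PySem.Int.toChars (code : Int)
  "[chr(".toList ++ List.replicate (3 - ds.length) '0' ++ ds ++ ")]".toList

-- ===== PORT A =====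
def show_chars (s : String) (blanks : Bool) : String :=
  let cs := s.toList
  let bad : List Char := "'\"[]()".toList
  String.mk ((PySem.List.pyRange 0 (cs.length : Int) 1).foldl (fun res i =>
    let c := PySem.List.pyGetD cs i ' '   -- s[i]; i always in range inside the loop
    if (c == ' ' && blanks) || decide (c < ' ') || decide ('~' < c)
        || decide (0 ≤ PySem.Chars.find bad [c]) then
      res ++ pvFmt c.toNat
    else
      res ++ [c]) [])

-- ===== PORT B =====
-- _TABLE: the dict of the six special characters, keyed by code point
def pvTable : PySem.Dict Nat (List Char) :=
  PySem.Dict.ofList ("'\"[]()".toList.map (fun c => (c.toNat, pvFmt c.toNat)))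

-- table lookup with the __missing__ fallback of Source B's _Table
def pvTr (c : Char) : List Char :=
  match pvTable.get? c.toNat with
  | some r => r
  | none => if 32 ≤ c.toNat ∧ c.toNat ≤ 126 then [c] else pvFmt c.toNat

def show_chars_alt (s : String) (blanks : Bool) : String :=
  let t : List Char := (s.toList.map pvTr).flatten    -- s.translate(_TABLE)
  String.mk (if blanks then PySem.Chars.replace t [' '] (pvFmt 32) else t)

-- ===== PRECONDITION & SPEC =====
def Spec_show_chars (s : String) (blanks : Bool) (out : String) : Prop := out = show_chars_alt s blanks
instance (s : String) (blanks : Bool) (out : String) : Decidable (Spec_show_chars s blanks out) := by unfold Spec_show_chars; infer_instance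

-- ===== CLAIM (what is proved, stated in full; the proofs are below) =====
def Claim_equal_show_chars : Prop := ∀ (s : String) (blanks : Bool), Dom_show_chars s blanks → Spec_show_chars s blanks (show_chars s blanks)

-- ===== LEMMAS AND PROOFS =====

-- A's per-character result
def pvFA (blanks : Bool) (c : Char) : List Char :=
  if (c == ' ' && blanks) || decide (c < ' ') || decide ('~' < c)
      || decide (0 ≤ PySem.Chars.find "'\"[]()".toList [c]) then
    pvFmt c.toNat
  else [c]

-- replacing a single character is a per-character flatMap
theorem pv_replace_go_single (a : Char) (new : List Char) :
    ∀ (l : List Char) (fuel : Nat) (acc : List Char), l.length ≤ fuel →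
      PySem.Chars.replace.go [a] new fuel l acc
        = acc.reverse ++ l.flatMap (fun c => if c == a then new else [c]) := by
  intro l
  induction l with
  | nil => intro fuel acc _; cases fuel <;> simp [PySem.Chars.replace.go]
  | cons c t ih =>
      intro fuel acc hf
      cases fuel with
      | zero => simp at hf
      | succ f =>
          simp only [PySem.Chars.replace.go, List.isPrefixOf, List.flatMap_cons]
          have ht : t.length ≤ f := by simpa using hf
          by_cases h : a = c
          · subst h
            rw [show List.drop [a].length (a :: t) = t from by simp]
            simp [ih f _ ht]
          · have h1 : (a == c) = false := by simpa using h
            have h2 : (c == a) = false := by simpa using (Ne.symm h)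
            simp [h1, h2, ih f _ ht]

theorem pv_replace_single (t : List Char) (a : Char) (r : List Char) :
    PySem.Chars.replace t [a] r = t.flatMap (fun c => if c == a then r else [c]) := by
  simp only [PySem.Chars.replace, List.isEmpty]
  rw [pv_replace_go_single a r t t.length [] (Nat.le_refl _)]
  simp

-- per-character agreement of the two programs, on every ASCII code point
theorem pv_perchar : ∀ n : Nat, n < 128 →
    ((pvTr (Char.ofNat n)).flatMap (fun d => if d == ' ' then pvFmt 32 else [d])
        = pvFA true (Char.ofNat n))
    ∧ (pvTr (Char.ofNat n) = pvFA false (Char.ofNat n)) := by decide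

theorem pv_dom_lt (c : Char) (h : pvDomChar c = true) : c.toNat < 128 := by
  simp [pvDomChar] at h; omega

theorem pv_perchar' (blanks : Bool) (c : Char) (h : pvDomChar c = true) :
    (if blanks then (pvTr c).flatMap (fun d => if d == ' ' then pvFmt 32 else [d]) else pvTr c)
      = pvFA blanks c := by
  have hlt := pv_dom_lt c h
  have hc : Char.ofNat c.toNat = c := Char.ofNat_toNat c
  cases blanks
  · simpa [hc] using (pv_perchar c.toNat hlt).2
  · simpa [hc] using (pv_perchar c.toNat hlt).1

theorem pv_A_flatMap (s : String) (blanks : Bool) :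
    show_chars s blanks = String.mk (s.toList.flatMap (pvFA blanks)) := by
  have hA : show_chars s blanks
      = String.mk ((PySem.List.pyRange 0 (s.toList.length : Int) 1).foldl (fun res i =>
          let c := PySem.List.pyGetD s.toList i ' '
          if (c == ' ' && blanks) || decide (c < ' ') || decide ('~' < c)
              || decide (0 ≤ PySem.Chars.find "'\"[]()".toList [c]) then res ++ pvFmt c.toNat
          else res ++ [c]) []) := rfl
  rw [hA]
  rw [PySem.List.foldl_pyRange_zero_pyGetD' s.toList ' '
        (fun res c => if (c == ' ' && blanks) || decide (c < ' ') || decide ('~' < c)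
          || decide (0 ≤ PySem.Chars.find "'\"[]()".toList [c]) then res ++ pvFmt c.toNat
          else res ++ [c]) []]
  congr 1
  have hstep : ∀ (res : List Char) (c : Char),
      (if (c == ' ' && blanks) || decide (c < ' ') || decide ('~' < c)
          || decide (0 ≤ PySem.Chars.find "'\"[]()".toList [c]) then res ++ pvFmt c.toNat
        else res ++ [c]) = res ++ pvFA blanks c := by
    intro res c; unfold pvFA; split <;> rfl
  have hcg := PySem.List.foldl_congr_mem (l := s.toList) (init := ([] : List Char))
    (f := fun res c => if (c == ' ' && blanks) || decide (c < ' ') || decide ('~' < c)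
        || decide (0 ≤ PySem.Chars.find "'\"[]()".toList [c]) then res ++ pvFmt c.toNat
        else res ++ [c])
    (g := fun res c => res ++ pvFA blanks c) (fun res c _ => hstep res c)
  rw [hcg, PySem.List.foldl_append_eq_flatMap]
  simp

-- ===== VERDICT (by name: the statement is the Claim_ definition above) =====
theorem show_chars_spec : Claim_equal_show_chars := by
  intro s blanks hdom
  unfold Spec_show_chars
  have hmem : ∀ c ∈ s.toList, pvDomChar c = true := by
    simpa [Dom_show_chars, pvDomStr, List.all_eq_true] using hdom
  rw [pv_A_flatMap]
  cases blanks
  · have hB : show_chars_alt s false = String.mk ((s.toList.map pvTr).flatten) := rfl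
    rw [hB]
    congr 1
    rw [← List.flatMap_def]
    exact (List.flatMap_congr (fun c hc => by
      simpa using (pv_perchar' false c (hmem c hc)).symm))
  · have hB : show_chars_alt s true
        = String.mk (PySem.Chars.replace ((s.toList.map pvTr).flatten) [' '] (pvFmt 32)) := rfl
    rw [hB]
    congr 1
    rw [← List.flatMap_def, pv_replace_single, List.flatMap_assoc]
    exact (List.flatMap_congr (fun c hc => by
      simpa using (pv_perchar' true c (hmem c hc)).symm))
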